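-- pv_equiv track=rewrite | github.com/wty-yy-mini/kimodo | kimodo/exports/bvh.py | _strip_end_site_blocks
-- ===== SOURCE A (Python) =====
-- def _strip_end_site_blocks(bvh_text: str) -> str:
--     """Remove all 'End Site { ... }' blocks from BVH text so output matches original format.
--
--     bvhio adds an End Site for every leaf joint when writing; we do not set EndSite on joints, so we
--     post-process the string to remove these blocks for Blender/original compatibility.
--     """
--     lines = bvh_text.splitlines(keepends=True)
--     result = []
--     i = 0
--     while i < len(lines):
--         line = lines[i]
--         if "End Site" in line:
--             # Skip this line and the following block { ... }; brace-count to find closing }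
--             i += 1
--             if i < len(lines) and "{" in lines[i]:
--                 i += 1
--                 depth = 1
--                 while i < len(lines) and depth > 0:
--                     if "{" in lines[i]:
--                         depth += 1
--                     if "}" in lines[i]:
--                         depth -= 1
--                     i += 1
--             continue
--         result.append(line)
--         i += 1
--     return "".join(result)
-- ===== SOURCE B (Python) =====
-- def _strip_end_site_blocks(bvh_text: str) -> str:
--     """Remove all 'End Site { ... }' blocks from BVH text (single forward state-machine pass)."""
--     out = []
--     state = 0  # 0 = normal, 1 = just saw 'End Site', 2 = inside the block
--     depth = 0
--     for line in bvh_text.splitlines(keepends=True):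
--         if state == 2:
--             if "{" in line:
--                 depth += 1
--             if "}" in line:
--                 depth -= 1
--             if depth == 0:
--                 state = 0
--         elif state == 1 and "{" in line:
--             state, depth = 2, 1
--         else:
--             # a non-'{' line right after 'End Site' is handled as a normal line
--             if "End Site" in line:
--                 state = 1
--             else:
--                 out.append(line)
--                 state = 0
--     return "".join(out)
-- ===== Notes on version B (the rewrite author's own statement) =====
-- stated objective: alternative
-- what changed: Replaced the index-driven while loop with a nested brace-skipping inner loop by a single forward for-pass over the lines driven by an explicit 3-state machine (normal / after-End-Site / in-block with depth counter).
import Mathlib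
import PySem

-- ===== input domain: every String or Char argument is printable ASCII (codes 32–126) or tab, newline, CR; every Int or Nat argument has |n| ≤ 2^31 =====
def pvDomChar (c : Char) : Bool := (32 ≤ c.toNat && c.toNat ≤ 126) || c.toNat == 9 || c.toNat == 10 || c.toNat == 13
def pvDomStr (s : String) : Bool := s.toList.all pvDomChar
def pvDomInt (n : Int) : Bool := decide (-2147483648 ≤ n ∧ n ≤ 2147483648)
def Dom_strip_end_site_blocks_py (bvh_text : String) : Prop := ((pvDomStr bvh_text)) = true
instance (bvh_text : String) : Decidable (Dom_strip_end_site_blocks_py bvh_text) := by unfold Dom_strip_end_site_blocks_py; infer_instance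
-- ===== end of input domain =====

-- B replaces A's index-driven while loop (with a nested brace-skipping inner loop) by a single
-- forward state-machine fold over the lines; same result, similar cost (objective: alternative).

-- ===== PORT A =====
-- splitlines(keepends=True): hand-ported (PySem.Str.splitlines drops the line endings).
-- Exact on the printable-ASCII + tab/NL/CR domain: the only line breaks there are '\n', '\r' and '\r\n'.
def pvSplitKeep : List Char → List Char → List (List Char)
  | acc, [] => if acc = [] then [] else [acc.reverse]
  | acc, '\r' :: '\n' :: rest => (acc.reverse ++ ['\r', '\n']) :: pvSplitKeep [] rest
  | acc, '\r' :: rest => (acc.reverse ++ ['\r']) :: pvSplitKeep [] rest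
  | acc, '\n' :: rest => (acc.reverse ++ ['\n']) :: pvSplitKeep [] rest
  | acc, c :: rest => pvSplitKeep (c :: acc) rest

-- "End Site" in line / "{" in line / "}" in line (both Pythons use exactly these tests)
def pvHasES (line : List Char) : Bool := PySem.Chars.isIn "End Site".toList line
def pvHasOpen (line : List Char) : Bool := PySem.Chars.isIn ['{'] line
def pvHasClose (line : List Char) : Bool := PySem.Chars.isIn ['}'] line

-- A's inner 'while i < len(lines) and depth > 0' loop: returns the remaining lines after the block
def pvSkipBlock : Int → List (List Char) → List (List Char)
  | _, [] => []
  | d, l :: rest =>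
    if d ≤ 0 then l :: rest
    else pvSkipBlock (d + (if pvHasOpen l then 1 else 0) + (if pvHasClose l then -1 else 0)) rest

-- needed by pvLoopA's decreasing_by
theorem pvSkipBlock_length_le (d : Int) (ls : List (List Char)) :
    (pvSkipBlock d ls).length ≤ ls.length := by
  induction ls generalizing d with
  | nil => simp [pvSkipBlock]
  | cons l rest ih =>
    rw [pvSkipBlock]
    split
    · exact le_refl _
    · exact le_trans (ih _) (Nat.le_succ _)

-- A's outer while loop over the line index, as structural recursion on the remaining lines
def pvLoopA : List (List Char) → List (List Char)
  | [] => []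
  | line :: rest =>
    if pvHasES line then
      match rest with
      | [] => []
      | l2 :: rest2 =>
        if pvHasOpen l2 then pvLoopA (pvSkipBlock 1 rest2)
        else pvLoopA (l2 :: rest2)
    else line :: pvLoopA rest
termination_by ls => ls.length
decreasing_by
  · exact Nat.lt_succ_of_le (Nat.le_succ_of_le (pvSkipBlock_length_le 1 rest2))
  · simp
  · simp

def strip_end_site_blocks_py (bvh_text : String) : String :=
  String.ofList (PySem.Chars.join [] (pvLoopA (pvSplitKeep [] bvh_text.toList)))

-- ===== PORT B =====
-- state: 0 = normal, 1 = just saw 'End Site', 2 = inside block (with depth); out accumulates kept lines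
def pvStepB (s : List (List Char) × Int × Int) (line : List Char) : List (List Char) × Int × Int :=
  let (out, st, depth) := s
  if st == 2 then
    let depth := depth + (if pvHasOpen line then 1 else 0)
    let depth := depth + (if pvHasClose line then -1 else 0)
    if depth == 0 then (out, 0, depth) else (out, st, depth)
  else if st == 1 && pvHasOpen line then (out, 2, 1)
  else
    if pvHasES line then (out, 1, depth) else (out ++ [line], 0, depth)

def strip_end_site_blocks_py_alt (bvh_text : String) : String :=
  String.ofList (PySem.Chars.join []
    ((List.foldl pvStepB ([], 0, 0) (pvSplitKeep [] bvh_text.toList)).1))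

-- ===== PRECONDITION & SPEC =====
def Spec_strip_end_site_blocks_py (bvh_text : String) (out : String) : Prop := out = strip_end_site_blocks_py_alt bvh_text
instance (bvh_text : String) (out : String) : Decidable (Spec_strip_end_site_blocks_py bvh_text out) := by unfold Spec_strip_end_site_blocks_py; infer_instance

-- ===== CLAIM (what is proved, stated in full; the proofs are below) =====
def Claim_equal_strip_end_site_blocks_py : Prop := ∀ (bvh_text : String), Dom_strip_end_site_blocks_py bvh_text → Spec_strip_end_site_blocks_py bvh_text (strip_end_site_blocks_py bvh_text)

-- ===== LEMMAS AND PROOFS =====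

theorem pvSkipBlock_nonpos (d : Int) (hd : d ≤ 0) (ls : List (List Char)) : pvSkipBlock d ls = ls := by
  cases ls <;> simp [pvSkipBlock, hd]

-- In-block: folding from state 2 / depth d ≥ 1 keeps out and lands in the normal state exactly
-- where A's inner loop (pvSkipBlock) resumes.
theorem pv_fold_block (ls : List (List Char)) (out : List (List Char)) (d : Int) (hd : 1 ≤ d) :
    (List.foldl pvStepB (out, 2, d) ls).1 = (List.foldl pvStepB (out, 0, 0) (pvSkipBlock d ls)).1 := by
  induction ls generalizing d with
  | nil => simp [pvSkipBlock]
  | cons l rest ih =>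
    rw [List.foldl_cons, pvSkipBlock, if_neg (by omega : ¬ d ≤ 0)]
    simp only [pvStepB]
    by_cases h0 : d + (if pvHasOpen l then 1 else 0) + (if pvHasClose l then -1 else 0) = 0
    · rw [pvSkipBlock_nonpos _ (le_of_eq h0)]
      simp [h0]
    · have h1 : 1 ≤ d + (if pvHasOpen l then 1 else 0) + (if pvHasClose l then -1 else 0) := by
        split_ifs at h0 ⊢ <;> omega
      simp only [beq_iff_eq, if_neg h0]
      exact ih _ h1

-- Main invariant: from the normal state the fold's output is out ++ pvLoopA ls.
theorem pv_fold_normal (ls : List (List Char)) (out : List (List Char)) :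
    (List.foldl pvStepB (out, 0, 0) ls).1 = out ++ pvLoopA ls := by
  match ls with
  | [] => simp [pvLoopA]
  | line :: rest =>
    rw [List.foldl_cons]
    by_cases hes : pvHasES line
    · have hstep : pvStepB (out, 0, 0) line = (out, 1, 0) := by simp [pvStepB, hes]
      rw [hstep]
      match rest with
      | [] => simp [pvLoopA, hes]
      | l2 :: rest2 =>
        rw [List.foldl_cons]
        by_cases ho : pvHasOpen l2
        · have hstep2 : pvStepB (out, 1, 0) l2 = (out, 2, 1) := by simp [pvStepB, ho]
          rw [hstep2, pv_fold_block rest2 out 1 (le_refl 1),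
              pv_fold_normal (pvSkipBlock 1 rest2) out]
          simp [pvLoopA, hes, ho]
        · have hstep2 : pvStepB (out, 1, 0) l2 = pvStepB (out, 0, 0) l2 := by
            simp [pvStepB, ho]
          rw [hstep2, ← List.foldl_cons, pv_fold_normal (l2 :: rest2) out]
          simp [pvLoopA, hes, ho]
    · have hstep : pvStepB (out, 0, 0) line = (out ++ [line], 0, 0) := by simp [pvStepB, hes]
      rw [hstep, pv_fold_normal rest (out ++ [line])]
      conv_rhs => rw [pvLoopA.eq_def]
      simp [hes]
termination_by ls.length
decreasing_by
  all_goals first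
    | exact Nat.lt_succ_of_le (Nat.le_succ_of_le (pvSkipBlock_length_le 1 rest2))
    | simp

-- ===== VERDICT (by name: the statement is the Claim_ definition above) =====
theorem strip_end_site_blocks_py_spec : Claim_equal_strip_end_site_blocks_py := by
  intro s _
  unfold Spec_strip_end_site_blocks_py strip_end_site_blocks_py strip_end_site_blocks_py_alt
  rw [pv_fold_normal, List.nil_append]
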